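-- pv_equiv track=rewrite | github.com/rehaansekap/PramLearn-Platform | backendpramlearn/pramlearnapp/views/teacher/sessions/teacherSessionAutoGroupFormationView.py | create_balanced_solution
-- ===== SOURCE A (Python) =====
-- def create_balanced_solution(students, n_groups, target_sizes):
--     """
--     Create balanced solution by motivation level
--     """
--     # Group students by motivation level
--     motivation_groups = {"High": [], "Medium": [], "Low": []}
--
--     for i, student in enumerate(students):
--         level = student["motivation_level"]
--         if level in motivation_groups:
--             motivation_groups[level].append(i)
--
--     # Create solution
--     solution = [0] * len(students)
--
--     # Distribute each motivation level evenly
--     for level, indices in motivation_groups.items():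
--         for i, student_idx in enumerate(indices):
--             group_idx = i % n_groups
--             solution[student_idx] = group_idx
--
--     return solution
-- ===== SOURCE B (Python) =====
-- def create_balanced_solution(students, n_groups, target_sizes):
--     """
--     Create balanced solution by motivation level (single streaming pass:
--     per-level running counters instead of materialized index lists).
--     """
--     counts = {"High": 0, "Medium": 0, "Low": 0}
--     solution = []
--     for student in students:
--         level = student["motivation_level"]
--         if level in counts:
--             solution.append(counts[level] % n_groups)
--             counts[level] += 1
--         else:
--             solution.append(0)
--     return solution
-- ===== Notes on version B (the rewrite author's own statement) =====
-- stated objective: simpler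
-- what changed: Replaces A's two-phase build (materialize three per-level index lists, then distribute each list round-robin into a preallocated solution array) by a single streaming pass that appends counts[level] % n_groups using per-level running counters.
import Mathlib
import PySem

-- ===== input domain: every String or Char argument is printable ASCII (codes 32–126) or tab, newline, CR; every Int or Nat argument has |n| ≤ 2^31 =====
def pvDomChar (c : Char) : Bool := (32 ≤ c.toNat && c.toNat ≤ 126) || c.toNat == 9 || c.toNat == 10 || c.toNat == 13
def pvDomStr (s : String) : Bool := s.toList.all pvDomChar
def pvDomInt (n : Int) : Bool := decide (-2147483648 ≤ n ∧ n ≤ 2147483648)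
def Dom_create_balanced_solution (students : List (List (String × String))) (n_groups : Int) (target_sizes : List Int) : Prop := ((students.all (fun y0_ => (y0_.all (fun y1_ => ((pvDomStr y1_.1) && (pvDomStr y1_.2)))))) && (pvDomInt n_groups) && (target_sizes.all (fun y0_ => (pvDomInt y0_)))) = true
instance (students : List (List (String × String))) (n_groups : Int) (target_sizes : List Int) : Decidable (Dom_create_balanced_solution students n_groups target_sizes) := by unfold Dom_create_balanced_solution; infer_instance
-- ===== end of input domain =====

-- B replaces A's two-phase build-then-distribute (three index lists, then round-robin writes)
-- by one streaming pass with per-level running counters (objective: simpler).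

-- shared helper: the value of student["motivation_level"]; the total guard `.getD ""` is
-- only exact where the key exists — missing keys (Python KeyError) are excluded by Pre_.
def pvLevel (student : List (String × String)) : String :=
  ((PySem.Dict.ofList student).get? "motivation_level").getD ""


-- ===== PORT A =====
def create_balanced_solution (students : List (List (String × String))) (n_groups : Int) (target_sizes : List Int) : List Int :=
  let mg0 : PySem.Dict String (List Int) :=
    PySem.Dict.ofList [("High", []), ("Medium", []), ("Low", [])]
  let mg := (PySem.List.enumerate students).foldl
    (fun g p =>
      let level := pvLevel p.2
      if g.contains level then g.modify level [] (fun l => l ++ [p.1]) else g) mg0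
  let solution : List Int := List.replicate students.length 0
  mg.items.foldl
    (fun sol pr =>
      (PySem.List.enumerate pr.2).foldl
        (fun sol q => PySem.List.pySetD sol q.2 (PySem.Int.mod q.1 n_groups)) sol)
    solution


-- ===== PORT B =====
def create_balanced_solution_alt (students : List (List (String × String))) (n_groups : Int) (target_sizes : List Int) : List Int :=
  let counts0 : PySem.Dict String Int :=
    PySem.Dict.ofList [("High", 0), ("Medium", 0), ("Low", 0)]
  (students.foldl
    (fun (st : List Int × PySem.Dict String Int) student =>
      let level := pvLevel student
      match st.2.get? level with
      | some c => (st.1 ++ [PySem.Int.mod c n_groups], st.2.insert level (c + 1))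
      | none   => (st.1 ++ [0], st.2)) ([], counts0)).1


-- ===== PRECONDITION & SPEC =====
-- Pre_ excludes exactly the inputs where Python A raises: a student dict without the
-- "motivation_level" key (KeyError), and n_groups = 0 while some student has a known
-- level (ZeroDivisionError from i % 0).
def Pre_create_balanced_solution (students : List (List (String × String))) (n_groups : Int) (target_sizes : List Int) : Prop :=
  (∀ s ∈ students, (PySem.Dict.ofList s).contains "motivation_level" = true) ∧
  (n_groups ≠ 0 ∨ ∀ s ∈ students, pvLevel s ≠ "High" ∧ pvLevel s ≠ "Medium" ∧ pvLevel s ≠ "Low")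
instance (students : List (List (String × String))) (n_groups : Int) (target_sizes : List Int) : Decidable (Pre_create_balanced_solution students n_groups target_sizes) := by unfold Pre_create_balanced_solution; infer_instance

def pvWitness_create_balanced_solution : (List (List (String × String))) × Int × List Int :=
  ([[("motivation_level", "High")], [("motivation_level", "Low")], [("name", "x"), ("motivation_level", "High")]], 2, [2, 1])

def Spec_create_balanced_solution (students : List (List (String × String))) (n_groups : Int) (target_sizes : List Int) (out : List Int) : Prop := out = create_balanced_solution_alt students n_groups target_sizes
instance (students : List (List (String × String))) (n_groups : Int) (target_sizes : List Int) (out : List Int) : Decidable (Spec_create_balanced_solution students n_groups target_sizes out) := by unfold Spec_create_balanced_solution; infer_instance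

-- ===== CLAIM (what is proved, stated in full; the proofs are below) =====
def Claim_equal_create_balanced_solution : Prop := ∀ (students : List (List (String × String))) (n_groups : Int) (target_sizes : List Int), Dom_create_balanced_solution students n_groups target_sizes → Pre_create_balanced_solution students n_groups target_sizes → Spec_create_balanced_solution students n_groups target_sizes (create_balanced_solution students n_groups target_sizes)

-- ===== LEMMAS AND PROOFS =====
def specLoop (ng : Int) : List (List (String × String)) → Int → Int → Int → List Int
  | [], _, _, _ => []
  | s :: rest, a, b, c =>
    if pvLevel s = "High" then PySem.Int.mod a ng :: specLoop ng rest (a + 1) b c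
    else if pvLevel s = "Medium" then PySem.Int.mod b ng :: specLoop ng rest a (b + 1) c
    else if pvLevel s = "Low" then PySem.Int.mod c ng :: specLoop ng rest a b (c + 1)
    else 0 :: specLoop ng rest a b c

def cnt (lvl : String) (ps : List (List (String × String))) : Nat :=
  ps.countP (fun s => pvLevel s == lvl)

-- generic 3-literal dict facts
theorem d3_ofList {ν : Type} (a b c : ν) :
    PySem.Dict.ofList [("High", a), ("Medium", b), ("Low", c)] = PySem.Dict.mk [("High", a), ("Medium", b), ("Low", c)] := by
  simp [PySem.Dict.ofList, PySem.Dict.update, PySem.Dict.empty, PySem.Dict.insert, PySem.Dict.contains]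
theorem d3_get? {ν : Type} (a b c : ν) (l : String) :
    (PySem.Dict.mk [("High", a), ("Medium", b), ("Low", c)]).get? l =
    if "High" = l then some a else if "Medium" = l then some b else if "Low" = l then some c else none := by
  simp only [PySem.Dict.get?_mk_cons]
  by_cases h1 : "High" = l <;> by_cases h2 : "Medium" = l <;> by_cases h3 : "Low" = l <;> simp_all [PySem.Dict.get?]
theorem d3_contains {ν : Type} (a b c : ν) (l : String) :
    (PySem.Dict.mk [("High", a), ("Medium", b), ("Low", c)]).contains l =
    ("High" == l || ("Medium" == l || "Low" == l)) := by
  simp [PySem.Dict.contains_mk]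
theorem d3_insert_H {ν : Type} (a b c v : ν) :
    (PySem.Dict.mk [("High", a), ("Medium", b), ("Low", c)]).insert "High" v = PySem.Dict.mk [("High", v), ("Medium", b), ("Low", c)] := by
  apply PySem.Dict.ext; simp [PySem.Dict.items_insert, PySem.Dict.contains]
theorem d3_insert_M {ν : Type} (a b c v : ν) :
    (PySem.Dict.mk [("High", a), ("Medium", b), ("Low", c)]).insert "Medium" v = PySem.Dict.mk [("High", a), ("Medium", v), ("Low", c)] := by
  apply PySem.Dict.ext; simp [PySem.Dict.items_insert, PySem.Dict.contains]
theorem d3_insert_L {ν : Type} (a b c v : ν) :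
    (PySem.Dict.mk [("High", a), ("Medium", b), ("Low", c)]).insert "Low" v = PySem.Dict.mk [("High", a), ("Medium", b), ("Low", v)] := by
  apply PySem.Dict.ext; simp [PySem.Dict.items_insert, PySem.Dict.contains]
theorem d3_modify_H {ν : Type} (a b c d0 : ν) (f : ν → ν) :
    (PySem.Dict.mk [("High", a), ("Medium", b), ("Low", c)]).modify "High" d0 f = PySem.Dict.mk [("High", f a), ("Medium", b), ("Low", c)] := by
  simp [PySem.Dict.modify, PySem.Dict.getD, d3_get?, d3_insert_H]

def bstep (ng : Int) (st : List Int × PySem.Dict String Int) (student : List (String × String)) : List Int × PySem.Dict String Int :=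
  let level := pvLevel student
  match st.2.get? level with
  | some cc => (st.1 ++ [PySem.Int.mod cc ng], st.2.insert level (cc + 1))
  | none   => (st.1 ++ [0], st.2)

theorem B_loop (ng : Int) (ps : List (List (String × String)))
    (acc : List Int) (a b c : Int) :
    ps.foldl (bstep ng) (acc, PySem.Dict.mk [("High", a), ("Medium", b), ("Low", c)]) =
    (acc ++ specLoop ng ps a b c,
     PySem.Dict.mk [("High", a + (cnt "High" ps : Int)), ("Medium", b + (cnt "Medium" ps : Int)), ("Low", c + (cnt "Low" ps : Int))]) := by
  induction ps generalizing acc a b c with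
  | nil => simp [specLoop, cnt]
  | cons s rest ih =>
    rw [List.foldl_cons]
    by_cases h1 : pvLevel s = "High"
    · have hstep : bstep ng (acc, PySem.Dict.mk [("High", a), ("Medium", b), ("Low", c)]) s
          = (acc ++ [PySem.Int.mod a ng], PySem.Dict.mk [("High", a + 1), ("Medium", b), ("Low", c)]) := by
        simp [bstep, h1, d3_get?, d3_insert_H]
      rw [hstep, ih]
      simp only [specLoop, h1, if_pos rfl, cnt, List.countP_cons]
      simp [h1]
      push_cast; ring
    · by_cases h2 : pvLevel s = "Medium"
      · have hstep : bstep ng (acc, PySem.Dict.mk [("High", a), ("Medium", b), ("Low", c)]) s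
            = (acc ++ [PySem.Int.mod b ng], PySem.Dict.mk [("High", a), ("Medium", b + 1), ("Low", c)]) := by
          simp [bstep, h1, h2, d3_get?, d3_insert_M]
        rw [hstep, ih]
        simp only [specLoop, h1, h2, if_neg, if_pos rfl, cnt, List.countP_cons]
        simp [h1, h2]
        push_cast; ring
      · by_cases h3 : pvLevel s = "Low"
        · have hstep : bstep ng (acc, PySem.Dict.mk [("High", a), ("Medium", b), ("Low", c)]) s
              = (acc ++ [PySem.Int.mod c ng], PySem.Dict.mk [("High", a), ("Medium", b), ("Low", c + 1)]) := by
            simp [bstep, h1, h2, h3, d3_get?, d3_insert_L]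
          rw [hstep, ih]
          simp only [specLoop, h1, h2, h3, cnt, List.countP_cons]
          simp [h1, h2, h3]
          push_cast; ring
        · have hstep : bstep ng (acc, PySem.Dict.mk [("High", a), ("Medium", b), ("Low", c)]) s
              = (acc ++ [0], PySem.Dict.mk [("High", a), ("Medium", b), ("Low", c)]) := by
            have h1' : ¬ ("High" = pvLevel s) := fun h => h1 h.symm
            have h2' : ¬ ("Medium" = pvLevel s) := fun h => h2 h.symm
            have h3' : ¬ ("Low" = pvLevel s) := fun h => h3 h.symm
            simp [bstep, d3_get?, h1', h2', h3']
          rw [hstep, ih]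
          simp only [specLoop, h1, h2, h3, cnt, List.countP_cons]
          simp [h1, h2, h3]

-- ===== A side =====
def astep (g : PySem.Dict String (List Int)) (p : Int × List (String × String)) : PySem.Dict String (List Int) :=
  let level := pvLevel p.2
  if g.contains level then g.modify level [] (fun l => l ++ [p.1]) else g

def sel (lvl : String) (E : List (Int × List (String × String))) : List Int :=
  E.filterMap (fun p => if pvLevel p.2 = lvl then some p.1 else none)

def pvInner (ng : Int) (sol : List Int) (s : Int) (I : List Int) : List Int :=
  (PySem.List.enumerate I s).foldl
    (fun sol q => PySem.List.pySetD sol q.2 (PySem.Int.mod q.1 ng)) sol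

theorem d3_modify_M {ν : Type} (a b c d0 : ν) (f : ν → ν) :
    (PySem.Dict.mk [("High", a), ("Medium", b), ("Low", c)]).modify "Medium" d0 f = PySem.Dict.mk [("High", a), ("Medium", f b), ("Low", c)] := by
  simp [PySem.Dict.modify, PySem.Dict.getD, d3_get?, d3_insert_M]
theorem d3_modify_L {ν : Type} (a b c d0 : ν) (f : ν → ν) :
    (PySem.Dict.mk [("High", a), ("Medium", b), ("Low", c)]).modify "Low" d0 f = PySem.Dict.mk [("High", a), ("Medium", b), ("Low", f c)] := by
  simp [PySem.Dict.modify, PySem.Dict.getD, d3_get?, d3_insert_L]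

theorem phase1 (E : List (Int × List (String × String))) (h m l : List Int) :
    E.foldl astep (PySem.Dict.mk [("High", h), ("Medium", m), ("Low", l)]) =
    PySem.Dict.mk [("High", h ++ sel "High" E), ("Medium", m ++ sel "Medium" E), ("Low", l ++ sel "Low" E)] := by
  induction E generalizing h m l with
  | nil => simp [sel]
  | cons p rest ih =>
    rw [List.foldl_cons]
    by_cases h1 : pvLevel p.2 = "High"
    · have hstep : astep (PySem.Dict.mk [("High", h), ("Medium", m), ("Low", l)]) p
          = PySem.Dict.mk [("High", h ++ [p.1]), ("Medium", m), ("Low", l)] := by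
        simp [astep, h1, d3_contains, d3_modify_H]
      rw [hstep, ih]
      simp [sel, h1]
    · by_cases h2 : pvLevel p.2 = "Medium"
      · have hstep : astep (PySem.Dict.mk [("High", h), ("Medium", m), ("Low", l)]) p
            = PySem.Dict.mk [("High", h), ("Medium", m ++ [p.1]), ("Low", l)] := by
          simp [astep, h2, d3_contains, d3_modify_M]
        rw [hstep, ih]
        simp [sel, h1, h2]
      · by_cases h3 : pvLevel p.2 = "Low"
        · have hstep : astep (PySem.Dict.mk [("High", h), ("Medium", m), ("Low", l)]) p
              = PySem.Dict.mk [("High", h), ("Medium", m), ("Low", l ++ [p.1])] := by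
            simp [astep, h3, d3_contains, d3_modify_L]
          rw [hstep, ih]
          simp [sel, h1, h2, h3]
        · have h1' : ¬ ("High" = pvLevel p.2) := fun h => h1 h.symm
          have h2' : ¬ ("Medium" = pvLevel p.2) := fun h => h2 h.symm
          have h3' : ¬ ("Low" = pvLevel p.2) := fun h => h3 h.symm
          have hstep : astep (PySem.Dict.mk [("High", h), ("Medium", m), ("Low", l)]) p
              = PySem.Dict.mk [("High", h), ("Medium", m), ("Low", l)] := by
            simp [astep, d3_contains, h1', h2', h3']
          rw [hstep, ih]
          simp [sel, h1, h2, h3]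

theorem inner_cons (ng : Int) (sol : List Int) (s j : Int) (I : List Int) :
    pvInner ng sol s (j :: I) = pvInner ng (PySem.List.pySetD sol j (PySem.Int.mod s ng)) (s + 1) I := by
  simp [pvInner, PySem.List.enumerate_cons]

theorem inner_length (ng : Int) (I : List Int) (sol : List Int) (s : Int) :
    (pvInner ng sol s I).length = sol.length := by
  induction I generalizing sol s with
  | nil => rfl
  | cons j I ih => rw [inner_cons, ih, PySem.List.length_pySetD]

theorem inner_append_last (ng : Int) (I : List Int) (sol : List Int) (s : Int) (v : Int)
    (hI : ∀ j ∈ I, ∃ m : Nat, j = (m : Int) ∧ m < sol.length) :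
    pvInner ng (sol ++ [v]) s I = pvInner ng sol s I ++ [v] := by
  induction I generalizing sol s with
  | nil => rfl
  | cons j I ih =>
    obtain ⟨m, rfl, hm⟩ := hI j (by simp)
    rw [inner_cons, inner_cons]
    rw [PySem.List.pySetD_natCast, PySem.List.pySetD_natCast, List.set_append_left _ _ hm]
    exact ih _ _ (fun j hj => by
      obtain ⟨k, rfl, hk⟩ := hI j (by simp [hj])
      exact ⟨k, rfl, by simpa using hk⟩)

theorem inner_snoc (ng : Int) (sol : List Int) (s j : Int) (I : List Int) :
    pvInner ng sol s (I ++ [j]) = PySem.List.pySetD (pvInner ng sol s I) j (PySem.Int.mod (s + I.length) ng) := by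
  simp [pvInner, PySem.List.enumerate_append, List.foldl_append, PySem.List.enumerate_cons]

theorem sel_mem (lvl : String) (ps : List (List (String × String))) (j : Int)
    (hj : j ∈ sel lvl (PySem.List.enumerate ps)) : ∃ m : Nat, j = (m : Int) ∧ m < ps.length := by
  simp only [sel, List.mem_filterMap] at hj
  obtain ⟨p, hp, hif⟩ := hj
  rw [PySem.List.mem_enumerate_iff] at hp
  obtain ⟨k, hk, rfl⟩ := hp
  refine ⟨k, ?_, hk⟩
  by_cases h : pvLevel (ps[k]) = lvl <;> simp [h] at hif <;> omega

theorem sel_length (lvl : String) (ps : List (List (String × String))) :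
    ∀ s : Int, (sel lvl (PySem.List.enumerate ps s)).length = cnt lvl ps := by
  induction ps with
  | nil => intro s; rfl
  | cons x rest ih =>
    intro s
    rw [PySem.List.enumerate_cons]
    by_cases h : pvLevel x = lvl <;> simp [sel, h, cnt, List.countP_cons] <;>
      simpa [sel, cnt] using ih (s + 1)

theorem sel_snoc (lvl : String) (E : List (Int × List (String × String))) (n : Int) (x : List (String × String)) :
    sel lvl (E ++ [(n, x)]) = sel lvl E ++ (if pvLevel x = lvl then [n] else []) := by
  by_cases h : pvLevel x = lvl <;> simp [sel, h]

theorem A_closed (ps : List (List (String × String))) (ng : Int) (ts : List Int) :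
    create_balanced_solution ps ng ts =
    pvInner ng (pvInner ng (pvInner ng (List.replicate ps.length 0) 0 (sel "High" (PySem.List.enumerate ps))) 0 (sel "Medium" (PySem.List.enumerate ps))) 0 (sel "Low" (PySem.List.enumerate ps)) := by
  show ((PySem.List.enumerate ps).foldl astep (PySem.Dict.ofList [("High", []), ("Medium", []), ("Low", [])])).items.foldl
      (fun sol pr => pvInner ng sol 0 pr.2) (List.replicate ps.length 0) = _
  rw [d3_ofList, phase1]
  simp [List.foldl]

def sval (ng : Int) (x : List (String × String)) (a b c : Int) : Int :=
  if pvLevel x = "High" then PySem.Int.mod a ng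
  else if pvLevel x = "Medium" then PySem.Int.mod b ng
  else if pvLevel x = "Low" then PySem.Int.mod c ng
  else 0

theorem spec_snoc (ng : Int) (ps : List (List (String × String))) (x : List (String × String)) :
    ∀ a b c : Int, specLoop ng (ps ++ [x]) a b c =
      specLoop ng ps a b c ++ [sval ng x (a + (cnt "High" ps : Int)) (b + (cnt "Medium" ps : Int)) (c + (cnt "Low" ps : Int))] := by
  induction ps with
  | nil =>
    intro a b c
    simp only [List.nil_append, specLoop, sval, cnt, List.countP_nil]
    split_ifs <;> simp
  | cons s rest ih =>
    intro a b c
    by_cases h1 : pvLevel s = "High"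
    · simp only [List.cons_append, specLoop, h1, if_pos rfl, ih, cnt, List.countP_cons]
      simp [h1]
      ring_nf
    · by_cases h2 : pvLevel s = "Medium"
      · simp only [List.cons_append, specLoop, h1, h2, ih, cnt, List.countP_cons]
        simp [h1, h2]
        ring_nf
      · by_cases h3 : pvLevel s = "Low"
        · simp only [List.cons_append, specLoop, h1, h2, h3, ih, cnt, List.countP_cons]
          simp [h1, h2, h3]
          ring_nf
        · simp only [List.cons_append, specLoop, h1, h2, h3, ih, cnt, List.countP_cons]
          simp [h1, h2, h3]

theorem setD_at_end (X : List Int) (v w : Int) (n : Nat) (h : X.length = n) :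
    PySem.List.pySetD (X ++ [v]) (n : Int) w = X ++ [w] := by
  rw [PySem.List.pySetD_natCast, ← h, List.set_append]
  simp

theorem pvInner_sel_append (ng : Int) (ps : List (List (String × String))) (lvl : String)
    (X : List Int) (hX : X.length = ps.length) (v : Int) :
    pvInner ng (X ++ [v]) 0 (sel lvl (PySem.List.enumerate ps)) =
    pvInner ng X 0 (sel lvl (PySem.List.enumerate ps)) ++ [v] := by
  apply inner_append_last
  intro j hj
  obtain ⟨m, rfl, hm⟩ := sel_mem lvl ps j hj
  exact ⟨m, rfl, by omega⟩

theorem A_snoc (ng : Int) (ts : List Int) (ps : List (List (String × String))) (x : List (String × String)) :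
    create_balanced_solution (ps ++ [x]) ng ts =
    create_balanced_solution ps ng ts ++ [sval ng x (cnt "High" ps : Int) (cnt "Medium" ps : Int) (cnt "Low" ps : Int)] := by
  rw [A_closed, A_closed]
  have hE : PySem.List.enumerate (ps ++ [x]) = PySem.List.enumerate ps ++ [((ps.length : Int), x)] := by
    rw [PySem.List.enumerate_append]
    simp [PySem.List.enumerate_cons]
  have hrep : List.replicate (ps ++ [x]).length (0 : Int) = List.replicate ps.length 0 ++ [0] := by
    simp [List.replicate_succ']
  rw [hE, hrep, sel_snoc, sel_snoc, sel_snoc]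
  have lenH : (pvInner ng (List.replicate ps.length (0:Int)) 0 (sel "High" (PySem.List.enumerate ps))).length = ps.length := by
    rw [inner_length]; simp
  have lenM : (pvInner ng (pvInner ng (List.replicate ps.length (0:Int)) 0 (sel "High" (PySem.List.enumerate ps))) 0 (sel "Medium" (PySem.List.enumerate ps))).length = ps.length := by
    rw [inner_length]; exact lenH
  by_cases h1 : pvLevel x = "High"
  · simp only [h1]
    norm_num
    rw [inner_snoc, pvInner_sel_append ng ps "High" _ (by simp) 0, setD_at_end _ _ _ _ lenH]
    rw [if_neg (by decide), if_neg (by decide), List.append_nil, List.append_nil]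
    rw [pvInner_sel_append ng ps "Medium" _ lenH, pvInner_sel_append ng ps "Low" _ lenM]
    congr 2
    rw [sel_length]
    simp [sval, h1]
  · by_cases h2 : pvLevel x = "Medium"
    · simp only [h2]
      norm_num
      rw [if_neg (by decide), if_neg (by decide), List.append_nil, List.append_nil]
      rw [pvInner_sel_append ng ps "High" _ (by simp) 0]
      rw [inner_snoc, pvInner_sel_append ng ps "Medium" _ lenH, setD_at_end _ _ _ _ lenM]
      rw [pvInner_sel_append ng ps "Low" _ lenM]
      congr 2
      rw [sel_length]
      simp [sval, h2, if_neg (fun h => h1 (h2.symm ▸ h))]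
    · by_cases h3 : pvLevel x = "Low"
      · simp only [h3]
        norm_num
        rw [if_neg (by decide), if_neg (by decide), List.append_nil, List.append_nil]
        rw [pvInner_sel_append ng ps "High" _ (by simp) 0]
        rw [pvInner_sel_append ng ps "Medium" _ lenH]
        rw [inner_snoc, pvInner_sel_append ng ps "Low" _ lenM, setD_at_end _ _ _ _ (by rw [inner_length]; exact lenM)]
        congr 2
        rw [sel_length]
        simp [sval, h3]
      · rw [if_neg h1, if_neg h2, if_neg h3, List.append_nil, List.append_nil, List.append_nil]
        rw [pvInner_sel_append ng ps "High" _ (by simp) 0]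
        rw [pvInner_sel_append ng ps "Medium" _ lenH]
        rw [pvInner_sel_append ng ps "Low" _ lenM]
        congr 2
        simp [sval, h1, h2, h3]

theorem A_eq_spec (students : List (List (String × String))) (ng : Int) (ts : List Int) :
    create_balanced_solution students ng ts = specLoop ng students 0 0 0 := by
  induction students using List.reverseRecOn with
  | nil => rw [A_closed]; rfl
  | append_singleton ps x ih =>
    rw [A_snoc, ih, spec_snoc]
    simp

theorem B_eq_spec (students : List (List (String × String))) (ng : Int) (ts : List Int) :
    create_balanced_solution_alt students ng ts = specLoop ng students 0 0 0 := by
  show (students.foldl (bstep ng) ([], PySem.Dict.ofList [("High", 0), ("Medium", 0), ("Low", 0)])).1 = _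
  rw [d3_ofList, B_loop]
  simp

-- ===== VERDICT (by name: the statement is the Claim_ definition above) =====
theorem create_balanced_solution_spec : Claim_equal_create_balanced_solution := by
  intro students ng ts _ _
  unfold Spec_create_balanced_solution
  rw [A_eq_spec, B_eq_spec]
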